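-- pv_equiv track=rewrite | github.com/nlongname/Project_Euler | 284alt.py | plus
-- ===== SOURCE A (Python) =====
-- def plus(x,y, base=14):#base-indep. add. using lists
--     if x == []:
--         return y
--     if y == []:
--         return x
--     if len(x) > len(y):
--         s = y
--         b = x
--     else:
--         s = x
--         b = y
--     ans = b+[0]
--     for i in range(len(s)):
--         ans[i] += s[i]
--     i=0
--     while i < len(ans):
--         if ans[i] >= base:
--             if i<len(ans)-1:
--                 ans[i+1] += int(ans[i]/base)
--                 ans[i] = ans[i]%base
--             else:
--                 ans.append(int(ans[i]/base))
--                 ans[i] = ans[i]%base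
--         i += 1
--     while ans[-1] >= base:
--         ans.append(int(ans[-1]/base))
--         ans[-1] = ans[-1]%base
--     if ans[-1] == 0:
--         ans = ans[:-1]
--     return(ans)
-- ===== SOURCE B (Python) =====
-- def plus(x, y, base=14):
--     # single left-to-right pass with a running carry (no in-place fixup rescan)
--     if x == []:
--         return y
--     if y == []:
--         return x
--     result = []
--     carry = 0
--     for i in range(max(len(x), len(y))):
--         d = carry + (x[i] if i < len(x) else 0) + (y[i] if i < len(y) else 0)
--         if d >= base:
--             result.append(d % base)
--             carry = int(d / base)
--         else:
--             result.append(d)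
--             carry = 0
--     while carry:
--         result.append(carry % base)
--         carry = int(carry / base)
--     return result
-- ===== Notes on version B (the rewrite author's own statement) =====
-- stated objective: simpler
-- what changed: A writes the shorter list into a copy of the longer one plus an extra 0 slot, then rescans the array in place propagating carries (growing it at the end) and finally strips one trailing zero; B computes the result in a single left-to-right pass with a running carry variable and flushes the leftover carry, never materialising or patching an intermediate array.
-- outside the precondition, e.g. on plus([-1], [0], 1): A returns [-1], B returns [-1]; on plus([0, 1], [0, 1], -1): A returns [0, 0, -2], B does not finish within the time limit
import Mathlib
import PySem

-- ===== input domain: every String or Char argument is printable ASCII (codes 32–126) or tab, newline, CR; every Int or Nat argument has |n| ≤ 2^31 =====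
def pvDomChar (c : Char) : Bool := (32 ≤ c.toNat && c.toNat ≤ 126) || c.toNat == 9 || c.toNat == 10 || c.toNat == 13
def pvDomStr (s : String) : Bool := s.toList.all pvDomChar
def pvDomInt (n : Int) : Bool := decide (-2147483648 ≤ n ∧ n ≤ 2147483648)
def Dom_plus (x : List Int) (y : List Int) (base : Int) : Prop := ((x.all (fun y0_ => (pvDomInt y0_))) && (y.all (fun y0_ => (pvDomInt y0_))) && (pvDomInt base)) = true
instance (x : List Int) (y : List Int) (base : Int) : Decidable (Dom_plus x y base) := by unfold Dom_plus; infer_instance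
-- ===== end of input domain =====

-- B replaces A's write-into-array pass + in-place carry-fixup rescan + trailing patches by one
-- left-to-right pass with a running carry (objective: simpler; return-value equivalence, A does not mutate its arguments).

-- ===== PORT A =====
-- int(a/b) is PySem.Int.truncdiv (exact for |a|,|b| < 2^53, which holds on Dom inside Pre_).
-- A's terminal carry chain: when the fixup loop stands on the LAST cell v ≥ base it appends
-- int(v/base), sets the cell to v%base and moves onto the appended cell — this helper is that chain.
-- Fuel (v.natAbs at the call sites below) bounds the appends; it suffices whenever base ≥ 2 (Pre_);
-- for base ≤ 1 the Python loop does not terminate (outside Pre_).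
def chainA (base : Int) : Nat → Int → List Int
  | 0, c => [c]
  | f+1, c => if c ≥ base then PySem.Int.mod c base :: chainA base f (PySem.Int.truncdiv c base) else [c]

-- A's first while loop 'i = 0; while i < len(ans): …; i += 1' rendered as a zipper
-- (acc = reversed cells already passed, rest = cells from i on); the growing-list append
-- case (i = len(ans)-1) is exactly chainA.
def fixA (base : Int) (acc : List Int) : List Int → List Int
  | [] => acc.reverse
  | [v] => acc.reverse ++ chainA base (v.natAbs + 1) v
  | v :: w :: rest =>
    if v ≥ base then fixA base (PySem.Int.mod v base :: acc) ((w + PySem.Int.truncdiv v base) :: rest)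
    else fixA base (v :: acc) (w :: rest)
  termination_by l => l.length

-- A's second while loop 'while ans[-1] >= base: ans.append(int(ans[-1]/base)); ans[-1] = ans[-1]%base'
-- (note: the assignment targets the APPENDED cell). Fueled; under Pre_ it runs zero iterations.
def while2A (base : Int) : Nat → List Int → List Int
  | 0, ans => ans
  | f+1, ans =>
    if PySem.List.pyGetD ans (-1) 0 ≥ base then
      let a2 := ans ++ [PySem.Int.truncdiv (PySem.List.pyGetD ans (-1) 0) base]
      while2A base f (PySem.List.pySetD a2 (-1) (PySem.Int.mod (PySem.List.pyGetD a2 (-1) 0) base))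
    else ans

def plus (x : List Int) (y : List Int) (base : Int) : List Int :=
  if x = [] then y
  else if y = [] then x
  else
    let sb := if y.length < x.length then (y, x) else (x, y)
    let s := sb.1
    let b := sb.2
    -- ans = b + [0]; for i in range(len(s)): ans[i] += s[i]
    let ans := (PySem.List.pyRange 0 (s.length : Int) 1).foldl
      (fun a i => PySem.List.pySetD a i (PySem.List.pyGetD a i 0 + PySem.List.pyGetD s i 0)) (b ++ [0])
    let ans2 := fixA base [] ans
    let ans3 := while2A base ((PySem.List.pyGetD ans2 (-1) 0).natAbs + 1) ans2
    if PySem.List.pyGetD ans3 (-1) 0 = 0 then PySem.List.slice ans3 none (some (-1)) else ans3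

-- ===== PORT B =====
-- 'while carry: result.append(carry % base); carry = int(carry / base)' — fueled, sufficient under Pre_.
def flushB (base : Int) : Nat → Int → List Int
  | 0, _ => []
  | f+1, c => if c ≠ 0 then PySem.Int.mod c base :: flushB base f (PySem.Int.truncdiv c base) else []

def plus_alt (x : List Int) (y : List Int) (base : Int) : List Int :=
  if x = [] then y
  else if y = [] then x
  else
    let n := max x.length y.length
    let rc := (PySem.List.pyRange 0 (n : Int) 1).foldl
      (fun (st : List Int × Int) i =>
        let d := st.2 + (if i < (x.length : Int) then PySem.List.pyGetD x i 0 else 0)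
                      + (if i < (y.length : Int) then PySem.List.pyGetD y i 0 else 0)
        if d ≥ base then (st.1 ++ [PySem.Int.mod d base], PySem.Int.truncdiv d base)
        else (st.1 ++ [d], 0)) ([], 0)
    rc.1 ++ flushB base (rc.2.natAbs + 1) rc.2

-- ===== PRECONDITION & SPEC =====
-- Pre_ excludes nonempty inputs with base ≤ 1, outside the natural positional domain base ≥ 2:
-- there A raises ZeroDivisionError (base = 0) or its fixup loop diverges on most inputs, and on the
-- inputs where A does still return (e.g. base = 1 with no positive digit sum, or a negative base
-- whose final carry happens to fall below it) B's carry loop does not terminate or the value is an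
-- accident of truncating division against a degenerate base.
def Pre_plus (x : List Int) (y : List Int) (base : Int) : Prop := x = [] ∨ y = [] ∨ 2 ≤ base
instance (x : List Int) (y : List Int) (base : Int) : Decidable (Pre_plus x y base) := by unfold Pre_plus; infer_instance
def pvWitness_plus : List Int × List Int × Int := ([1, 27], [13], 14)
def Spec_plus (x : List Int) (y : List Int) (base : Int) (out : List Int) : Prop := out = plus_alt x y base
instance (x : List Int) (y : List Int) (base : Int) (out : List Int) : Decidable (Spec_plus x y base out) := by unfold Spec_plus; infer_instance

-- ===== CLAIM (what is proved, stated in full; the proofs are below) =====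
def Claim_equal_plus : Prop := ∀ (x : List Int) (y : List Int) (base : Int), Dom_plus x y base → Pre_plus x y base → Spec_plus x y base (plus x y base)

-- ===== LEMMAS AND PROOFS =====

-- pointwise sum with zero extension (the digit sums both programs work on)
def zext : List Int → List Int → List Int
  | [], ys => ys
  | x :: xs, [] => x :: xs
  | x :: xs, y :: ys => (x + y) :: zext xs ys

-- the (digits, final carry) both programs compute over the digit sums
def AC (base : Int) : List Int → Int → List Int × Int
  | [], c => ([], c)
  | z :: t, c =>
    let d := c + z
    if d ≥ base then
      let r := AC base t (PySem.Int.truncdiv d base)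
      (PySem.Int.mod d base :: r.1, r.2)
    else
      let r := AC base t 0
      (d :: r.1, r.2)

-- the list A's fixup loop starts from, with incoming carry c merged into the head
def wc (c : Int) : List Int → List Int
  | [] => [c]
  | z :: t => (c + z) :: (t ++ [0])

-- arithmetic facts for the carry chain (base ≥ 2, positive value)
theorem tdiv_bounds (c base : Int) (hb : 2 ≤ base) (hc : base ≤ c) :
    1 ≤ PySem.Int.truncdiv c base ∧ PySem.Int.truncdiv c base < c := by
  have he : PySem.Int.truncdiv c base = c / base := by
    simp [PySem.Int.truncdiv, Int.tdiv_eq_ediv_of_nonneg (by omega : (0:Int) ≤ c)]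
  have hq : 1 ≤ c / base := by rw [Int.le_ediv_iff_mul_le (by omega)]; omega
  have hm : c / base * base ≤ c := Int.ediv_mul_le c (by omega)
  have : 2 * (c / base) ≤ c / base * base := by nlinarith
  exact ⟨by omega, by omega⟩

theorem tdiv_small (c base : Int) (h0 : 0 ≤ c) (h2 : c < base) : PySem.Int.truncdiv c base = 0 := by
  simp [PySem.Int.truncdiv, Int.tdiv_eq_ediv_of_nonneg h0, Int.ediv_eq_zero_of_lt h0 h2]

theorem mod_small (c base : Int) (h : 0 < base) (h0 : 0 ≤ c) (h2 : c < base) : PySem.Int.mod c base = c := by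
  simp [PySem.Int.mod_eq_emod_of_pos h, Int.emod_eq_of_lt h0 h2]

theorem flushB_zero (base : Int) : ∀ f, flushB base f 0 = [] := by
  intro f; cases f <;> simp [flushB]

-- chainA and flushB produce the same chain on a positive carry (base ≥ 2, enough fuel)
theorem chain_eq_flush (base : Int) (hb : 2 ≤ base) :
    ∀ (f f' : Nat) (c : Int), 0 < c → c.natAbs < f → c.natAbs < f' →
      chainA base f c = flushB base f' c := by
  intro f
  induction f with
  | zero => intro f' c _ h; omega
  | succ f ih =>
    intro f' c hc hf hf'
    match f' with
    | 0 => omega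
    | f' + 1 =>
      by_cases hge : c ≥ base
      · have hd := tdiv_bounds c base hb hge
        simp only [chainA, flushB, if_pos hge, if_pos (by omega : c ≠ 0)]
        congr 1
        exact ih f' _ (by omega) (by omega) (by omega)
      · have hlt : c < base := by omega
        simp only [chainA, flushB, if_neg hge, if_pos (by omega : c ≠ 0),
          mod_small c base (by omega) (by omega) hlt, tdiv_small c base (by omega) hlt]
        simp [flushB_zero]

-- the last digit of a positive carry chain lies in (0, base)
theorem chain_last (base : Int) (hb : 2 ≤ base) :
    ∀ (f : Nat) (c : Int), 0 < c → c.natAbs < f →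
      ∃ L l, chainA base f c = L ++ [l] ∧ 0 < l ∧ l < base := by
  intro f
  induction f with
  | zero => intro c _ h; omega
  | succ f ih =>
    intro c hc hf
    by_cases hge : c ≥ base
    · have hd := tdiv_bounds c base hb hge
      obtain ⟨L, l, hEq, hl0, hlb⟩ := ih (PySem.Int.truncdiv c base) (by omega) (by omega)
      exact ⟨PySem.Int.mod c base :: L, l, by simp [chainA, if_pos hge, hEq], hl0, hlb⟩
    · exact ⟨[], c, by simp [chainA, if_neg hge], hc, by omega⟩

theorem zext_nil_right (a : List Int) : zext a [] = a := by cases a <;> rfl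

theorem zext_comm (a : List Int) : ∀ b, zext a b = zext b a := by
  induction a with
  | nil => intro b; rw [zext_nil_right]; rfl
  | cons x xs ih =>
    intro b
    cases b with
    | nil => rfl
    | cons y ys => simp [zext, ih, Int.add_comm]

theorem zext_length (a : List Int) : ∀ b, (zext a b).length = max a.length b.length := by
  induction a with
  | nil => intro b; simp [zext]
  | cons x xs ih =>
    intro b
    cases b with
    | nil => simp [zext]
    | cons y ys => simp only [zext, List.length_cons, ih]; omega

theorem zext_getD (a : List Int) : ∀ (b : List Int) (i : Nat), (zext a b).getD i 0 = a.getD i 0 + b.getD i 0 := by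
  induction a with
  | nil => intro b i; simp [zext]
  | cons x xs ih =>
    intro b i
    cases b with
    | nil => simp [zext]
    | cons y ys =>
      cases i with
      | zero => simp [zext]
      | succ i => simpa [zext] using ih ys i

-- the final carry of AC is nonnegative (base ≥ 2)
theorem AC_carry_nonneg (base : Int) (hb : 2 ≤ base) :
    ∀ (zs : List Int) (c : Int), 0 ≤ c → 0 ≤ (AC base zs c).2 := by
  intro zs
  induction zs with
  | nil => intro c hc; simpa [AC] using hc
  | cons z t ih =>
    intro c hc
    by_cases hge : c + z ≥ base
    · have := tdiv_bounds (c + z) base hb hge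
      simpa [AC, if_pos hge] using ih _ (by omega)
    · simpa [AC, if_neg hge] using ih 0 (by omega)

-- A's fixup pass over the digit sums (incoming carry merged into the head) is AC plus the terminal chain
theorem fix_spec (base : Int) :
    ∀ (zs : List Int) (acc : List Int) (c : Int),
      fixA base acc (wc c zs) =
        acc.reverse ++ (AC base zs c).1 ++ chainA base ((AC base zs c).2.natAbs + 1) (AC base zs c).2 := by
  intro zs
  induction zs with
  | nil => intro acc c; simp [wc, fixA, AC]
  | cons z t ih =>
    intro acc c
    cases t with
    | nil =>
      by_cases hge : c + z ≥ base
      · have h1 : fixA base acc (wc c [z]) =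
            fixA base (PySem.Int.mod (c + z) base :: acc) [PySem.Int.truncdiv (c + z) base] := by
          simp [wc, fixA, if_pos hge]
        rw [h1]
        have h2 := ih (PySem.Int.mod (c + z) base :: acc) (PySem.Int.truncdiv (c + z) base)
        simp only [wc] at h2
        rw [h2]
        simp [AC, if_pos hge]
      · have h1 : fixA base acc (wc c [z]) = fixA base ((c + z) :: acc) [(0:Int)] := by
          simp [wc, fixA, if_neg hge]
        rw [h1]
        have h2 := ih ((c + z) :: acc) 0
        simp only [wc] at h2
        rw [h2]
        simp [AC, if_neg hge]
    | cons w r =>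
      by_cases hge : c + z ≥ base
      · have h1 : fixA base acc ((c + z) :: w :: (r ++ [0])) =
            fixA base (PySem.Int.mod (c + z) base :: acc) ((w + PySem.Int.truncdiv (c + z) base) :: (r ++ [0])) := by
          rw [fixA, if_pos hge]
        have h2 : (w + PySem.Int.truncdiv (c + z) base) :: (r ++ [0]) =
            wc (PySem.Int.truncdiv (c + z) base) (w :: r) := by
          show _ = (PySem.Int.truncdiv (c + z) base + w) :: (r ++ [0])
          rw [Int.add_comm w]
        rw [show wc c (z :: w :: r) = (c + z) :: w :: (r ++ [0]) from by simp [wc], h1, h2, ih]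
        simp [AC, if_pos hge]
      · have h1 : fixA base acc ((c + z) :: w :: (r ++ [0])) =
            fixA base ((c + z) :: acc) (w :: (r ++ [0])) := by
          rw [fixA, if_neg hge]
        have h2 : w :: (r ++ [0]) = wc 0 (w :: r) := by
          show _ = (0 + w) :: (r ++ [0])
          rw [Int.zero_add w]
        rw [show wc c (z :: w :: r) = (c + z) :: w :: (r ++ [0]) from by simp [wc], h1, h2, ih]
        simp [AC, if_neg hge]

theorem take_getD (s : List Int) (m i : Nat) : (s.take m).getD i 0 = if i < m then s.getD i 0 else 0 := by
  simp only [List.getD_eq_getElem?_getD, List.getElem?_take]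
  split_ifs <;> simp

theorem zext_getElem? (a b : List Int) (i : Nat) :
    (zext a b)[i]? = if i < max a.length b.length then some (a.getD i 0 + b.getD i 0) else none := by
  by_cases h : i < max a.length b.length
  · have hlen : i < (zext a b).length := by rw [zext_length]; omega
    rw [if_pos h, List.getElem?_eq_getElem hlen, ← List.getD_eq_getElem (zext a b) 0 hlen, zext_getD]
  · rw [if_neg h, List.getElem?_eq_none]
    rw [zext_length]; omega

theorem step_set (s b : List Int) (n : Nat) (hn : n < s.length) (hsb : s.length ≤ b.length) :
    (zext (s.take n) b ++ [0]).set n ((zext (s.take n) b ++ [0]).getD n 0 + s.getD n 0)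
      = zext (s.take (n + 1)) b ++ [0] := by
  have hXlen : (zext (s.take n) b).length = b.length := by
    rw [zext_length]; simp [List.length_take]; omega
  have hYlen : (zext (s.take (n + 1)) b).length = b.length := by
    rw [zext_length]; simp [List.length_take]; omega
  have hv : (zext (s.take n) b ++ [0]).getD n 0 = b.getD n 0 := by
    rw [List.getD_eq_getElem?_getD, List.getElem?_append_left (by omega), zext_getElem?,
      if_pos (by simp [List.length_take]; omega), take_getD, if_neg (by omega)]
    simp
  rw [hv]
  apply List.ext_getElem?
  intro i
  rw [List.getElem?_set]
  by_cases hi : n = i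
  · subst hi
    rw [if_pos rfl, if_pos (by simp [hXlen]; omega)]
    rw [List.getElem?_append_left (by omega), zext_getElem?,
      if_pos (by simp [List.length_take]; omega), take_getD, if_pos (by omega)]
    rw [Int.add_comm]
  · rw [if_neg hi]
    by_cases hib : i < b.length
    · rw [List.getElem?_append_left (by omega), List.getElem?_append_left (by omega),
        zext_getElem?, zext_getElem?, if_pos (by simp [List.length_take]; omega),
        if_pos (by simp [List.length_take]; omega), take_getD, take_getD]
      have : (if i < n then s.getD i 0 else 0) = (if i < n + 1 then s.getD i 0 else 0) := by
        split_ifs with h1 h2 <;> first | rfl | omega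
      rw [this]
    · rw [List.getElem?_append, List.getElem?_append, if_neg (by omega), if_neg (by omega),
        hXlen, hYlen]

theorem initA_fold (s b : List Int) (hsb : s.length ≤ b.length) :
    (PySem.List.pyRange 0 (s.length : Int) 1).foldl
      (fun a i => PySem.List.pySetD a i (PySem.List.pyGetD a i 0 + PySem.List.pyGetD s i 0)) (b ++ [0])
    = zext s b ++ [0] := by
  have key : ∀ n, n ≤ s.length →
      (List.range n).foldl (fun (a : List Int) (k : Nat) => a.set k (a.getD k 0 + s.getD k 0)) (b ++ [0])
        = zext (s.take n) b ++ [0] := by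
    intro n
    induction n with
    | zero => intro _; simp [zext_comm, zext_nil_right]
    | succ n ih =>
      intro hn
      rw [List.range_succ, List.foldl_append, ih (by omega)]
      simpa using step_set s b n (by omega) hsb
  rw [PySem.List.pyRange_zero_natCast s.length, List.foldl_map]
  simp only [PySem.List.pySetD_natCast, PySem.List.pyGetD_natCast]
  rw [key s.length le_rfl, List.take_length]

-- B's index loop over the digit sums is AC
theorem B_fold (x y : List Int) (base : Int) :
    ∀ (t : List Int) (k : Nat) (res : List Int) (c : Int),
      (zext x y).drop k = t →
      (PySem.List.pyRange (k : Int) ((max x.length y.length : Nat) : Int) 1).foldl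
        (fun (st : List Int × Int) i =>
          let d := st.2 + (if i < (x.length : Int) then PySem.List.pyGetD x i 0 else 0)
                        + (if i < (y.length : Int) then PySem.List.pyGetD y i 0 else 0)
          if d ≥ base then (st.1 ++ [PySem.Int.mod d base], PySem.Int.truncdiv d base)
          else (st.1 ++ [d], 0)) (res, c)
      = (res ++ (AC base t c).1, (AC base t c).2) := by
  intro t
  induction t with
  | nil =>
    intro k res c hdrop
    have hlen : (zext x y).length ≤ k := by
      by_contra h
      have := congrArg List.length hdrop
      simp [List.length_drop] at this
      omega
    rw [zext_length] at hlen
    rw [PySem.List.pyRange_one_eq_nil (by exact_mod_cast hlen)]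
    simp [AC]
  | cons z t ih =>
    intro k res c hdrop
    have hk : k < (zext x y).length := by
      by_contra h
      rw [List.drop_eq_nil_of_le (by omega)] at hdrop
      simp at hdrop
    have hkm : k < max x.length y.length := by rw [zext_length] at hk; omega
    have hz : (zext x y).getD k 0 = z := by
      have h0 : ((zext x y).drop k)[0]? = some z := by rw [hdrop]; rfl
      rw [List.getElem?_drop] at h0
      simp only [List.getD_eq_getElem?_getD]
      simpa using congrArg (Option.getD · 0) h0
    have hdrop' : (zext x y).drop (k + 1) = t := by
      have : (zext x y).drop (k + 1) = ((zext x y).drop k).drop 1 := by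
        rw [List.drop_drop, Nat.add_comm]
      rw [this, hdrop, List.drop_one, List.tail_cons]
    rw [PySem.List.pyRange_one_cons (by exact_mod_cast hkm), List.foldl_cons]
    have hread : (if (k : Int) < (x.length : Int) then PySem.List.pyGetD x (k : Int) 0 else 0)
        + (if (k : Int) < (y.length : Int) then PySem.List.pyGetD y (k : Int) 0 else 0)
        = z := by
      rw [← hz, zext_getD]
      congr 1
      · split_ifs with h
        · simp
        · rw [List.getD_eq_default]; push_cast at h; omega
      · split_ifs with h
        · simp
        · rw [List.getD_eq_default]; push_cast at h; omega
    have hcast : (k : Int) + 1 = ((k + 1 : Nat) : Int) := by push_cast; ring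
    simp only []
    rw [show c + (if (k : Int) < (x.length : Int) then PySem.List.pyGetD x (k : Int) 0 else 0)
          + (if (k : Int) < (y.length : Int) then PySem.List.pyGetD y (k : Int) 0 else 0) = c + z by
        rw [Int.add_assoc, hread]]
    by_cases hge : c + z ≥ base
    · rw [if_pos hge, hcast, ih (k + 1) (res ++ [PySem.Int.mod (c + z) base]) (PySem.Int.truncdiv (c + z) base) hdrop']
      simp [AC, if_pos hge]
    · rw [if_neg hge, hcast, ih (k + 1) (res ++ [c + z]) 0 hdrop']
      simp [AC, if_neg hge]

-- shared tail of A after its initial array is known to be the digit sums plus the trailing 0 slot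
theorem after_init (base : Int) (hb : 2 ≤ base) (zs : List Int) (hne : zs ≠ []) :
    (if PySem.List.pyGetD
          (while2A base ((PySem.List.pyGetD (fixA base [] (zs ++ [0])) (-1) 0).natAbs + 1)
            (fixA base [] (zs ++ [0]))) (-1) 0 = 0 then
        PySem.List.slice
          (while2A base ((PySem.List.pyGetD (fixA base [] (zs ++ [0])) (-1) 0).natAbs + 1)
            (fixA base [] (zs ++ [0]))) none (some (-1))
      else
        while2A base ((PySem.List.pyGetD (fixA base [] (zs ++ [0])) (-1) 0).natAbs + 1)
          (fixA base [] (zs ++ [0])))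
    = (AC base zs 0).1 ++ flushB base ((AC base zs 0).2.natAbs + 1) (AC base zs 0).2 := by
  have hwc : zs ++ [0] = wc 0 zs := by
    cases zs with
    | nil => exact absurd rfl hne
    | cons z t => simp [wc]
  have hfix : fixA base [] (zs ++ [0]) =
      (AC base zs 0).1 ++ chainA base ((AC base zs 0).2.natAbs + 1) (AC base zs 0).2 := by
    rw [hwc, fix_spec]; simp
  have hc2 : 0 ≤ (AC base zs 0).2 := AC_carry_nonneg base hb zs 0 le_rfl
  rcases eq_or_lt_of_le hc2 with hz | hpos
  · -- final carry 0: A's trailing slot holds 0 and is stripped; B flushes nothing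
    have hchain : chainA base ((AC base zs 0).2.natAbs + 1) (AC base zs 0).2 = [0] := by
      rw [← hz]
      simp [chainA, if_neg (by omega : ¬ (0 : Int) ≥ base)]
    rw [hfix, hchain]
    have hlast : PySem.List.pyGetD ((AC base zs 0).1 ++ [0]) (-1) 0 = 0 :=
      PySem.List.pyGetD_neg_one_append_singleton _ 0 0
    rw [hlast]
    have hw2 : while2A base ((0 : Int).natAbs + 1) ((AC base zs 0).1 ++ [0]) =
        (AC base zs 0).1 ++ [0] := by
      rw [while2A, hlast, if_neg (by omega)]
    rw [hw2, hlast, if_pos rfl, PySem.List.slice_to_neg_one, List.dropLast_concat]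
    rw [← hz]
    simp [flushB]
  · -- positive final carry: the chain ends in a digit in (0, base): no fixup, no strip
    obtain ⟨L, l, hEq, hl0, hlb⟩ :=
      chain_last base hb ((AC base zs 0).2.natAbs + 1) (AC base zs 0).2 hpos (by omega)
    have hassoc : (AC base zs 0).1 ++ (L ++ [l]) = ((AC base zs 0).1 ++ L) ++ [l] := by
      rw [List.append_assoc]
    have hlast : PySem.List.pyGetD ((AC base zs 0).1 ++
        chainA base ((AC base zs 0).2.natAbs + 1) (AC base zs 0).2) (-1) 0 = l := by
      rw [hEq, hassoc]
      exact PySem.List.pyGetD_neg_one_append_singleton _ l 0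
    rw [hfix, hlast]
    have hw2 : while2A base (l.natAbs + 1) ((AC base zs 0).1 ++
        chainA base ((AC base zs 0).2.natAbs + 1) (AC base zs 0).2) =
        (AC base zs 0).1 ++ chainA base ((AC base zs 0).2.natAbs + 1) (AC base zs 0).2 := by
      rw [while2A, hlast, if_neg (by omega)]
    rw [hw2, hlast, if_neg (by omega)]
    rw [chain_eq_flush base hb ((AC base zs 0).2.natAbs + 1) ((AC base zs 0).2.natAbs + 1)
      (AC base zs 0).2 hpos (by omega) (by omega)]

theorem main_eq (x y : List Int) (base : Int) (hb : 2 ≤ base) (hx : x ≠ []) (hy : y ≠ [])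
    : plus x y base = plus_alt x y base := by
  have hne : zext x y ≠ [] := by
    intro h
    have := zext_length x y
    rw [h] at this
    cases x with
    | nil => exact hx rfl
    | cons a t => simp at this; omega
  have hBside : plus_alt x y base =
      (AC base (zext x y) 0).1 ++
        flushB base ((AC base (zext x y) 0).2.natAbs + 1) (AC base (zext x y) 0).2 := by
    simp only [plus_alt, if_neg hx, if_neg hy]
    have hB := B_fold x y base (zext x y) 0 [] 0 rfl
    norm_num at hB ⊢
    rw [hB]
  rw [plus, if_neg hx, if_neg hy]
  by_cases hlen : y.length < x.length
  · simp only [if_pos hlen]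
    rw [initA_fold y x (by omega), zext_comm y x]
    rw [after_init base hb (zext x y) hne, hBside]
  · simp only [if_neg hlen]
    rw [initA_fold x y (by omega), after_init base hb (zext x y) hne, hBside]

-- ===== VERDICT (by name: the statement is the Claim_ definition above) =====
theorem plus_spec : Claim_equal_plus := by
  unfold Claim_equal_plus
  intro x y base _ hpre
  unfold Spec_plus
  rcases eq_or_ne x [] with hx | hx
  · subst hx; simp [plus, plus_alt]
  rcases eq_or_ne y [] with hy | hy
  · subst hy; simp [plus, plus_alt, hx]
  have hb : 2 ≤ base := by
    rcases hpre with h | h | h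
    · exact absurd h hx
    · exact absurd h hy
    · exact h
  exact main_eq x y base hb hx hy
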